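-- pv_equiv track=rewrite | github.com/STAR-Laboratory/PRAC_TC_ISCA25 | TPRAC/champsim-ramulator2/champsim/scripts/sim_scripts/TPRAC/calc_rh_parameters.py | get_tprac_s_parameters
-- ===== SOURCE A (Python) =====
-- def get_tprac_s_parameters(tRH):
--     nrh_nbo_pairs = [
--         (128, 974),
--         (256, 1442),
--         (512, 2898),
--         (1024, 6070),
--         (2048, 13038),
--         (4096, 28638),
--     ]
--     for nrh, NBO in nrh_nbo_pairs:
--         if tRH <= nrh:
--             return NBO
--     return 32
-- ===== SOURCE B (Python) =====
-- import bisect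
--
-- _THRESHOLDS = [128, 256, 512, 1024, 2048, 4096]
-- _VALUES = [974, 1442, 2898, 6070, 13038, 28638, 32]
--
-- def get_tprac_s_parameters(tRH):
--     return _VALUES[bisect.bisect_left(_THRESHOLDS, tRH)]
-- ===== Notes on version B (the rewrite author's own statement) =====
-- stated objective: idiomatic
-- what changed: Replaces the sequential scan over (threshold, value) pairs with a binary search (bisect_left) over a sorted threshold table and a direct index into a parallel value list (with the fallback 32 appended).
import Mathlib
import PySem

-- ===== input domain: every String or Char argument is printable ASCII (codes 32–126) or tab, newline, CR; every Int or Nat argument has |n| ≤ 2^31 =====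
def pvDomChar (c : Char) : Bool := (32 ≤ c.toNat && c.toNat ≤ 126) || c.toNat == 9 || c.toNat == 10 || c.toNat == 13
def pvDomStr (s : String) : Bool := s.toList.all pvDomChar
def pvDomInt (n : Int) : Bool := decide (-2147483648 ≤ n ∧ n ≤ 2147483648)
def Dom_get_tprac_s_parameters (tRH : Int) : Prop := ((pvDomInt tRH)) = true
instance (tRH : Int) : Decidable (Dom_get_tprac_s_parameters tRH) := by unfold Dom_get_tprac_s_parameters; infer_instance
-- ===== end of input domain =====

-- B replaces A's sequential scan of (threshold, value) pairs with a bisect_left binary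
-- search on a sorted threshold table plus an index into a parallel value list (idiomatic).

-- ===== PORT A =====
-- literal port of A's for-loop over the pair list with early return
def pvScanA : List (Int × Int) → Int → Int
  | [], _ => 32
  | (nrh, nbo) :: rest, tRH => if tRH ≤ nrh then nbo else pvScanA rest tRH

def get_tprac_s_parameters (tRH : Int) : Int :=
  pvScanA [(128, 974), (256, 1442), (512, 2898), (1024, 6070), (2048, 13038), (4096, 28638)] tRH

-- ===== PORT B =====
-- bisect.bisect_left(a, x) on the segment [lo, hi): while lo < hi, mid = (lo+hi)//2 …
def pvBisectLeft (a : List Int) (x : Int) (lo hi : Nat) : Nat :=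
  if lo < hi then
    let mid := (lo + hi) / 2
    if a.getD mid 0 < x then pvBisectLeft a x (mid + 1) hi else pvBisectLeft a x lo mid
  else lo
termination_by hi - lo
decreasing_by all_goals omega

def pvThresholds : List Int := [128, 256, 512, 1024, 2048, 4096]
def pvValues : List Int := [974, 1442, 2898, 6070, 13038, 28638, 32]

def get_tprac_s_parameters_alt (tRH : Int) : Int :=
  pvValues.getD (pvBisectLeft pvThresholds tRH 0 pvThresholds.length) 0

-- ===== PRECONDITION & SPEC =====
def Spec_get_tprac_s_parameters (tRH : Int) (out : Int) : Prop := out = get_tprac_s_parameters_alt tRH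
instance (tRH : Int) (out : Int) : Decidable (Spec_get_tprac_s_parameters tRH out) := by unfold Spec_get_tprac_s_parameters; infer_instance

-- ===== CLAIM (what is proved, stated in full; the proofs are below) =====
def Claim_equal_get_tprac_s_parameters : Prop := ∀ (tRH : Int), Dom_get_tprac_s_parameters tRH → Spec_get_tprac_s_parameters tRH (get_tprac_s_parameters tRH)

-- ===== LEMMAS AND PROOFS =====

-- ===== VERDICT (by name: the statement is the Claim_ definition above) =====
theorem get_tprac_s_parameters_spec : Claim_equal_get_tprac_s_parameters := by
  intro tRH _
  unfold Spec_get_tprac_s_parameters get_tprac_s_parameters get_tprac_s_parameters_alt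
  simp only [pvThresholds, pvValues, List.length_cons, List.length_nil]
  simp [pvBisectLeft, pvScanA]
  split_ifs <;> simp_all <;> omega
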